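-- pv_equiv track=rewrite | github.com/fsalmasri/sustain | OuatDataSet.py | nodes_names_remapping
-- ===== SOURCE A (Python) =====
-- def nodes_names_remapping(g):
--
--     nodes_embed = {
--             "pumpHead": 0,
--             "asepticDisconnector": 1,
--             "mechanicDisconnector": 2,
--             "quickCoupler": 3,
--             "triclampConnector": 4,
--             "bioreactorBag": 5,
--             "twoDimensionalBag": 6,
--             "threeDimensionalBag": 7,
--             "mixerBag": 8,
--             "bottle": 9,
--             "plug": 10,
--             "sensor": 11,
--             "couplerReducer": 12,
--             "straightFitting": 13,
--             "lConnector": 14,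
--             "tConnector": 15,
--             "yConnector": 16,
--             "xConnector": 17,
--             "asepticConnector": 18,
--             "sipConnector": 19,
--             "pinchClamp": 20,
--             "hydrophobicFilter": 21,
--             "hydrophilicFilter": 22,
--             "tubing": 23
--         }
--
--     node_feats = []
--     for node in g:
--         if 'B' in node:
--             node_feats.append(nodes_embed['bioreactorBag'])
--         elif 'H' in node:
--             node_feats.append(nodes_embed['hydrophobicFilter'])
--         elif 'F' in node:
--             node_feats.append(nodes_embed['hydrophilicFilter'])
--         elif 'Q' in node:
--             node_feats.append(nodes_embed['quickCoupler'])
--         elif 'Y' in node: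
--             node_feats.append(nodes_embed['yConnector'])
--         elif 'X' in node:
--             node_feats.append(nodes_embed['xConnector'])
--         elif 'P' in node:
--             node_feats.append(nodes_embed['plug'])
--         elif 'A' in node:
--             node_feats.append(nodes_embed['asepticConnector'])
--         if 'D' in node:
--             node_feats.append(nodes_embed['asepticDisconnector'])
--         elif 'S' in node:
--             node_feats.append(nodes_embed['straightFitting'])
--         elif 'M' in node:
--             node_feats.append(nodes_embed['mixerBag'])
--         elif 'R' in node:
--             node_feats.append(nodes_embed['couplerReducer'])
--         elif 'T' in node:
--             node_feats.append(nodes_embed['triclampConnector'])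
--
--     return node_feats
-- ===== SOURCE B (Python) =====
-- # B scans each node's characters ONCE, keeping the minimum-priority match per
-- # table, instead of running two if/elif substring-test chains per node.
-- _PRIO1 = {'B': (0, 5), 'H': (1, 21), 'F': (2, 22), 'Q': (3, 3),
--           'Y': (4, 16), 'X': (5, 17), 'P': (6, 10), 'A': (7, 18)}
-- _PRIO2 = {'D': (0, 1), 'S': (1, 13), 'M': (2, 8), 'R': (3, 12), 'T': (4, 4)}
--
--
-- def nodes_names_remapping(g):
--     node_feats = []
--     for node in g:
--         best1 = None
--         best2 = None
--         for ch in node: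
--             p = _PRIO1.get(ch)
--             if p is not None and (best1 is None or p[0] < best1[0]):
--                 best1 = p
--             q = _PRIO2.get(ch)
--             if q is not None and (best2 is None or q[0] < best2[0]):
--                 best2 = q
--         if best1 is not None:
--             node_feats.append(best1[1])
--         if best2 is not None:
--             node_feats.append(best2[1])
--     return node_feats
-- ===== Notes on version B (the rewrite author's own statement) =====
-- stated objective: alternative
-- what changed: Instead of running two 8/5-branch if-elif chains of substring tests per node, B scans each node's characters exactly once, looking each character up in two priority maps and keeping the minimum-priority hit per map; A's first-match-in-chain equals B's minimum priority present, which the Lean proof establishes via a sorted-priority-table lemma.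
import Mathlib
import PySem

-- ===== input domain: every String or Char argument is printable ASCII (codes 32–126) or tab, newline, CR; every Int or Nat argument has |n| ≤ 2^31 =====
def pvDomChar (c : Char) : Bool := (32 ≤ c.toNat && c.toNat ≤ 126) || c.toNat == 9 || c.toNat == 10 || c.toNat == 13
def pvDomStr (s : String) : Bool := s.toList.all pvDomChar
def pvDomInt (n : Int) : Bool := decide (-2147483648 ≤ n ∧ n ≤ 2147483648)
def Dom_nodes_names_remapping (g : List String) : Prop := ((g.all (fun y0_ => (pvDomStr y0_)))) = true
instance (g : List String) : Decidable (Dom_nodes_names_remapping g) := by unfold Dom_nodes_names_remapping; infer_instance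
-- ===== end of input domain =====

-- B scans each node's characters once, keeping the minimum-priority hit per priority map,
-- instead of A's two if/elif chains of substring tests per node; alternative, same cost.

-- ===== PORT A =====
-- the nodes_embed dict of A; every key A looks up is present, so getD's default is never used
def nodesEmbed : PySem.Dict String Int := PySem.Dict.ofList
  [("pumpHead", 0), ("asepticDisconnector", 1), ("mechanicDisconnector", 2),
   ("quickCoupler", 3), ("triclampConnector", 4), ("bioreactorBag", 5),
   ("twoDimensionalBag", 6), ("threeDimensionalBag", 7), ("mixerBag", 8),
   ("bottle", 9), ("plug", 10), ("sensor", 11), ("couplerReducer", 12),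
   ("straightFitting", 13), ("lConnector", 14), ("tConnector", 15),
   ("yConnector", 16), ("xConnector", 17), ("asepticConnector", 18),
   ("sipConnector", 19), ("pinchClamp", 20), ("hydrophobicFilter", 21),
   ("hydrophilicFilter", 22), ("tubing", 23)]

def stepA (node_feats : List Int) (node : String) : List Int :=
  let nf1 :=
    if PySem.Str.isIn "B" node then node_feats ++ [PySem.Dict.getD nodesEmbed "bioreactorBag" 0]
    else if PySem.Str.isIn "H" node then node_feats ++ [PySem.Dict.getD nodesEmbed "hydrophobicFilter" 0]
    else if PySem.Str.isIn "F" node then node_feats ++ [PySem.Dict.getD nodesEmbed "hydrophilicFilter" 0]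
    else if PySem.Str.isIn "Q" node then node_feats ++ [PySem.Dict.getD nodesEmbed "quickCoupler" 0]
    else if PySem.Str.isIn "Y" node then node_feats ++ [PySem.Dict.getD nodesEmbed "yConnector" 0]
    else if PySem.Str.isIn "X" node then node_feats ++ [PySem.Dict.getD nodesEmbed "xConnector" 0]
    else if PySem.Str.isIn "P" node then node_feats ++ [PySem.Dict.getD nodesEmbed "plug" 0]
    else if PySem.Str.isIn "A" node then node_feats ++ [PySem.Dict.getD nodesEmbed "asepticConnector" 0]
    else node_feats
  if PySem.Str.isIn "D" node then nf1 ++ [PySem.Dict.getD nodesEmbed "asepticDisconnector" 0]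
  else if PySem.Str.isIn "S" node then nf1 ++ [PySem.Dict.getD nodesEmbed "straightFitting" 0]
  else if PySem.Str.isIn "M" node then nf1 ++ [PySem.Dict.getD nodesEmbed "mixerBag" 0]
  else if PySem.Str.isIn "R" node then nf1 ++ [PySem.Dict.getD nodesEmbed "couplerReducer" 0]
  else if PySem.Str.isIn "T" node then nf1 ++ [PySem.Dict.getD nodesEmbed "triclampConnector" 0]
  else nf1

def nodes_names_remapping (g : List String) : List Int :=
  g.foldl stepA []

-- ===== PORT B =====
def prio1 : PySem.Dict Char (Int × Int) := PySem.Dict.ofList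
  [('B', (0, 5)), ('H', (1, 21)), ('F', (2, 22)), ('Q', (3, 3)),
   ('Y', (4, 16)), ('X', (5, 17)), ('P', (6, 10)), ('A', (7, 18))]
def prio2 : PySem.Dict Char (Int × Int) := PySem.Dict.ofList
  [('D', (0, 1)), ('S', (1, 13)), ('M', (2, 8)), ('R', (3, 12)), ('T', (4, 4))]

-- one iteration of B's inner character loop: update both running minima
def stepB (s : Option (Int × Int) × Option (Int × Int)) (ch : Char) :
    Option (Int × Int) × Option (Int × Int) :=
  let best1 :=
    match PySem.Dict.get? prio1 ch with
    | none => s.1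
    | some p => match s.1 with
                | none => some p
                | some b => if p.1 < b.1 then some p else s.1
  let best2 :=
    match PySem.Dict.get? prio2 ch with
    | none => s.2
    | some q => match s.2 with
                | none => some q
                | some b => if q.1 < b.1 then some q else s.2
  (best1, best2)

def stepNodeB (node_feats : List Int) (node : String) : List Int :=
  let bests := node.toList.foldl stepB (none, none)
  let nf1 := match bests.1 with
             | some p => node_feats ++ [p.2]
             | none => node_feats
  match bests.2 with
  | some q => nf1 ++ [q.2]
  | none => nf1

def nodes_names_remapping_alt (g : List String) : List Int :=
  g.foldl stepNodeB []

-- ===== PRECONDITION & SPEC =====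
def Spec_nodes_names_remapping (g : List String) (out : List Int) : Prop := out = nodes_names_remapping_alt g
instance (g : List String) (out : List Int) : Decidable (Spec_nodes_names_remapping g out) := by unfold Spec_nodes_names_remapping; infer_instance

-- ===== CLAIM (what is proved, stated in full; the proofs are below) =====
def Claim_equal_nodes_names_remapping : Prop := ∀ (g : List String), Dom_nodes_names_remapping g → Spec_nodes_names_remapping g (nodes_names_remapping g)

-- ===== LEMMAS AND PROOFS =====

-- the minimum-tracking merge underlying stepB
def pmerge (acc : Option (Int × Int)) (x : Option (Int × Int)) : Option (Int × Int) :=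
  match acc, x with
  | none, x => x
  | some b, none => some b
  | some b, some p => if p.1 < b.1 then some p else some b

-- generic priority table: (letter, priority, code); chainM = first letter present,
-- lookT = entry of a single character
def chainM : List (Char × Int × Int) → List Char → Option (Int × Int)
  | [], _ => none
  | (l, pr, cd) :: rest, chars =>
      if l ∈ chars then some (pr, cd) else chainM rest chars

def lookT : List (Char × Int × Int) → Char → Option (Int × Int)
  | [], _ => none
  | (l, pr, cd) :: rest, c => if c = l then some (pr, cd) else lookT rest c

def tblB1 : List (Char × Int × Int) :=
  [('B', 0, 5), ('H', 1, 21), ('F', 2, 22), ('Q', 3, 3),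
   ('Y', 4, 16), ('X', 5, 17), ('P', 6, 10), ('A', 7, 18)]
def tblB2 : List (Char × Int × Int) :=
  [('D', 0, 1), ('S', 1, 13), ('M', 2, 8), ('R', 3, 12), ('T', 4, 4)]

theorem chainM_some (t : List (Char × Int × Int)) (cs : List Char) (q : Int × Int)
    (h : chainM t cs = some q) : q ∈ t.map Prod.snd := by
  induction t with
  | nil => simp [chainM] at h
  | cons e rest ih =>
      rcases e with ⟨l, pr, cd⟩
      by_cases hm : l ∈ cs
      · simp [chainM, hm] at h
        simp [← h]
      · simp only [chainM, if_neg hm] at h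
        simp [ih h]

theorem lookT_some (t : List (Char × Int × Int)) (c : Char) (q : Int × Int)
    (h : lookT t c = some q) : q ∈ t.map Prod.snd := by
  induction t with
  | nil => simp [lookT] at h
  | cons e rest ih =>
      rcases e with ⟨l, pr, cd⟩
      by_cases hc : c = l
      · simp [lookT, hc] at h
        simp [← h]
      · simp only [lookT, if_neg hc] at h
        simp [ih h]

-- one character prepended: the chain's first-present value is the min-merge of the
-- character's entry with the chain over the rest (needs strictly increasing priorities)
theorem chainM_cons (t : List (Char × Int × Int))
    (ht : t.Pairwise (fun x y => x.2.1 < y.2.1)) (c : Char) (cs : List Char) :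
    chainM t (c :: cs) = pmerge (lookT t c) (chainM t cs) := by
  induction t with
  | nil => rfl
  | cons e rest ih =>
      rcases e with ⟨l, pr, cd⟩
      rcases List.pairwise_cons.mp ht with ⟨hlt, hrest⟩
      by_cases hcl : c = l
      · subst hcl
        rw [show chainM ((c, pr, cd) :: rest) (c :: cs) = some (pr, cd) by
              simp [chainM],
            show lookT ((c, pr, cd) :: rest) c = some (pr, cd) by simp [lookT]]
        rcases h : chainM ((c, pr, cd) :: rest) cs with _ | q
        · rfl
        · have hq := chainM_some _ _ _ h
          simp only [List.map_cons, List.mem_cons] at hq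
          have hge : ¬ q.1 < pr := by
            rcases hq with hq | hq
            · simp [hq]
            · obtain ⟨e, he, hee⟩ := List.mem_map.mp hq
              have h2 : pr < q.1 := by rw [← hee]; exact hlt e he
              omega
          simp [pmerge, hge]
      · have hlk : lookT ((l, pr, cd) :: rest) c = lookT rest c := by
          simp [lookT, hcl]
        by_cases hl : l ∈ cs
        · rw [show chainM ((l, pr, cd) :: rest) (c :: cs) = some (pr, cd) by
                simp [chainM, List.mem_cons_of_mem _ hl],
              show chainM ((l, pr, cd) :: rest) cs = some (pr, cd) by
                simp [chainM, hl],
              hlk]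
          rcases hr : lookT rest c with _ | q
          · rfl
          · have hq := lookT_some _ _ _ hr
            obtain ⟨e, he, hee⟩ := List.mem_map.mp hq
            have hpr : pr < q.1 := by rw [← hee]; exact hlt e he
            simp [pmerge, hpr]
        · have hmem : l ∉ c :: cs := by
            simp only [List.mem_cons, not_or]
            exact ⟨fun h => hcl h.symm, hl⟩
          rw [show chainM ((l, pr, cd) :: rest) (c :: cs) = chainM rest (c :: cs) by
                simp [chainM, hmem],
              show chainM ((l, pr, cd) :: rest) cs = chainM rest cs by
                simp [chainM, hl],
              hlk]
          exact ih hrest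

theorem lookB1_eq (c : Char) : PySem.Dict.get? prio1 c = lookT tblB1 c := by
  by_cases h1 : c = 'B'; · subst h1; decide
  by_cases h2 : c = 'H'; · subst h2; decide
  by_cases h3 : c = 'F'; · subst h3; decide
  by_cases h4 : c = 'Q'; · subst h4; decide
  by_cases h5 : c = 'Y'; · subst h5; decide
  by_cases h6 : c = 'X'; · subst h6; decide
  by_cases h7 : c = 'P'; · subst h7; decide
  by_cases h8 : c = 'A'; · subst h8; decide
  have hk : prio1.keys = ['B', 'H', 'F', 'Q', 'Y', 'X', 'P', 'A'] := by decide
  have hn : PySem.Dict.get? prio1 c = none := by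
    rw [PySem.Dict.get?_eq_none_iff_not_mem_keys, hk]; simp_all
  rw [hn]
  simp [tblB1, lookT, h1, h2, h3, h4, h5, h6, h7, h8]

theorem lookB2_eq (c : Char) : PySem.Dict.get? prio2 c = lookT tblB2 c := by
  by_cases h1 : c = 'D'; · subst h1; decide
  by_cases h2 : c = 'S'; · subst h2; decide
  by_cases h3 : c = 'M'; · subst h3; decide
  by_cases h4 : c = 'R'; · subst h4; decide
  by_cases h5 : c = 'T'; · subst h5; decide
  have hk : prio2.keys = ['D', 'S', 'M', 'R', 'T'] := by decide
  have hn : PySem.Dict.get? prio2 c = none := by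
    rw [PySem.Dict.get?_eq_none_iff_not_mem_keys, hk]; simp_all
  rw [hn]
  simp [tblB2, lookT, h1, h2, h3, h4, h5]

theorem stepB_eq (s : Option (Int × Int) × Option (Int × Int)) (c : Char) :
    stepB s c = (pmerge s.1 (PySem.Dict.get? prio1 c), pmerge s.2 (PySem.Dict.get? prio2 c)) := by
  rcases s with ⟨a, b⟩
  rcases h1 : PySem.Dict.get? prio1 c with _ | p <;>
    rcases h2 : PySem.Dict.get? prio2 c with _ | q <;>
    rcases a with _ | a <;> rcases b with _ | b <;>
    simp [stepB, pmerge, h1, h2]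

theorem foldl_stepB (chars : List Char) (a b : Option (Int × Int)) :
    chars.foldl stepB (a, b) = (pmerge a (chainM tblB1 chars), pmerge b (chainM tblB2 chars)) := by
  induction chars generalizing a b with
  | nil => cases a <;> cases b <;> rfl
  | cons c cs ih =>
      have assoc : ∀ x y z : Option (Int × Int),
          pmerge (pmerge x y) z = pmerge x (pmerge y z) := by
        intro x y z
        rcases x with _ | x <;> rcases y with _ | y <;> rcases z with _ | z <;>
          simp only [pmerge] <;> split_ifs <;> first | rfl | (simp only [pmerge]; split_ifs <;> first | rfl | omega)
      have h1 : chainM tblB1 (c :: cs) = pmerge (PySem.Dict.get? prio1 c) (chainM tblB1 cs) := by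
        rw [lookB1_eq]; exact chainM_cons tblB1 (by decide) c cs
      have h2 : chainM tblB2 (c :: cs) = pmerge (PySem.Dict.get? prio2 c) (chainM tblB2 cs) := by
        rw [lookB2_eq]; exact chainM_cons tblB2 (by decide) c cs
      simp only [List.foldl, stepB_eq, ih, h1, h2, assoc]

-- bridge: a single-character substring test is membership of the character
theorem isIn_single (sub : String) (a : Char) (h : sub.toList = [a]) (s : String) :
    PySem.Str.isIn sub s = decide (a ∈ s.toList) := by
  have key : PySem.Str.isIn sub s = true ↔ a ∈ s.toList := by
    rw [PySem.Str.isIn_iff_infix, h, List.singleton_infix_iff]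
  apply Bool.eq_iff_iff.mpr
  rw [key]; simp

def optCode : Option (Int × Int) → List Int
  | some p => [p.2]
  | none => []

theorem chainA1 (acc : List Int) (node : String) :
    (if PySem.Str.isIn "B" node then acc ++ [5]
     else if PySem.Str.isIn "H" node then acc ++ [21]
     else if PySem.Str.isIn "F" node then acc ++ [22]
     else if PySem.Str.isIn "Q" node then acc ++ [3]
     else if PySem.Str.isIn "Y" node then acc ++ [16]
     else if PySem.Str.isIn "X" node then acc ++ [17]
     else if PySem.Str.isIn "P" node then acc ++ [10]
     else if PySem.Str.isIn "A" node then acc ++ [18]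
     else acc) = acc ++ optCode (chainM tblB1 node.toList) := by
  simp only [isIn_single "B" 'B' rfl, isIn_single "H" 'H' rfl, isIn_single "F" 'F' rfl,
    isIn_single "Q" 'Q' rfl, isIn_single "Y" 'Y' rfl, isIn_single "X" 'X' rfl,
    isIn_single "P" 'P' rfl, isIn_single "A" 'A' rfl, decide_eq_true_eq,
    tblB1, chainM]
  split_ifs <;> simp [optCode]

theorem chainA2 (acc : List Int) (node : String) :
    (if PySem.Str.isIn "D" node then acc ++ [1]
     else if PySem.Str.isIn "S" node then acc ++ [13]
     else if PySem.Str.isIn "M" node then acc ++ [8]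
     else if PySem.Str.isIn "R" node then acc ++ [12]
     else if PySem.Str.isIn "T" node then acc ++ [4]
     else acc) = acc ++ optCode (chainM tblB2 node.toList) := by
  simp only [isIn_single "D" 'D' rfl, isIn_single "S" 'S' rfl, isIn_single "M" 'M' rfl,
    isIn_single "R" 'R' rfl, isIn_single "T" 'T' rfl, decide_eq_true_eq,
    tblB2, chainM]
  split_ifs <;> simp [optCode]

theorem stepA_eq_stepNodeB (acc : List Int) (node : String) :
    stepA acc node = stepNodeB acc node := by
  have e1 : PySem.Dict.getD nodesEmbed "bioreactorBag" 0 = 5 := by decide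
  have e2 : PySem.Dict.getD nodesEmbed "hydrophobicFilter" 0 = 21 := by decide
  have e3 : PySem.Dict.getD nodesEmbed "hydrophilicFilter" 0 = 22 := by decide
  have e4 : PySem.Dict.getD nodesEmbed "quickCoupler" 0 = 3 := by decide
  have e5 : PySem.Dict.getD nodesEmbed "yConnector" 0 = 16 := by decide
  have e6 : PySem.Dict.getD nodesEmbed "xConnector" 0 = 17 := by decide
  have e7 : PySem.Dict.getD nodesEmbed "plug" 0 = 10 := by decide
  have e8 : PySem.Dict.getD nodesEmbed "asepticConnector" 0 = 18 := by decide
  have e9 : PySem.Dict.getD nodesEmbed "asepticDisconnector" 0 = 1 := by decide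
  have e10 : PySem.Dict.getD nodesEmbed "straightFitting" 0 = 13 := by decide
  have e11 : PySem.Dict.getD nodesEmbed "mixerBag" 0 = 8 := by decide
  have e12 : PySem.Dict.getD nodesEmbed "couplerReducer" 0 = 12 := by decide
  have e13 : PySem.Dict.getD nodesEmbed "triclampConnector" 0 = 4 := by decide
  simp only [stepA, stepNodeB, e1, e2, e3, e4, e5, e6, e7, e8, e9, e10, e11, e12, e13,
    foldl_stepB, chainA1, chainA2]
  rcases chainM tblB1 node.toList with _ | p <;>
    rcases chainM tblB2 node.toList with _ | q <;>
    simp [pmerge, optCode, List.append_assoc]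

theorem foldl_eq (g : List String) (acc : List Int) :
    g.foldl stepA acc = g.foldl stepNodeB acc := by
  induction g generalizing acc with
  | nil => rfl
  | cons h t ih => simp only [List.foldl, stepA_eq_stepNodeB, ih]

-- ===== VERDICT (by name: the statement is the Claim_ definition above) =====
theorem nodes_names_remapping_spec : Claim_equal_nodes_names_remapping := by
  intro g _
  unfold Spec_nodes_names_remapping nodes_names_remapping nodes_names_remapping_alt
  exact foldl_eq g []
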